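-- pv_equiv track=rewrite | github.com/Ahuanmarca/cuestionario-adaptativo | funciones/parser.py | actualizar_valor
-- ===== SOURCE A (Python) =====
-- def actualizar_valor(texto: str, etiqueta: str, nuevo_valor: str) -> str:
--     """
--     Reemplaza el valor asociado a una etiqueta específica en un texto multilínea.
--     La etiqueta debe estar sola en una línea, y el valor asociado son las líneas
--     que siguen hasta la próxima etiqueta (otra línea que comience con "_").
--
--     Args:
--         texto (str): Texto estructurado con etiquetas tipo "_ETIQUETA\nvalor".
--         etiqueta (str): La etiqueta que se desea actualizar (ej. "_COBERTURA").
--         nuevo_valor (str): El nuevo valor que se insertará debajo de la etiqueta.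
--
--     Returns:
--         str: El texto con el valor reemplazado.
--     """
--     lineas = texto.splitlines()
--     resultado = []
--     i = 0
--     while i < len(lineas):
--         linea = lineas[i]
--         resultado.append(linea)
--
--         if linea.strip() == etiqueta:
--             i += 1  # saltar a la línea siguiente, que será reemplazada
--             # eliminar todas las líneas del valor actual
--             while i < len(lineas) and not lineas[i].startswith("_"):
--                 i += 1
--             # insertar el nuevo valor (puede ser multilínea)
--             resultado.extend(nuevo_valor.splitlines())
--             continue
--
--         i += 1
--
--     return "\n".join(resultado)
-- ===== SOURCE B (Python) =====
-- def actualizar_valor(texto: str, etiqueta: str, nuevo_valor: str) -> str: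
--     # One-pass fold with a 'skipping' flag instead of A's index jumps with a nested while.
--     nv = nuevo_valor.splitlines()
--     resultado = []
--     skipping = False
--     for linea in texto.splitlines():
--         if linea.startswith("_"):
--             skipping = False
--         if not skipping:
--             resultado.append(linea)
--             if linea.strip() == etiqueta:
--                 resultado.extend(nv)
--                 skipping = True
--     return "\n".join(resultado)
-- ===== Notes on version B (the rewrite author's own statement) =====
-- stated objective: simpler
-- what changed: Replaces A's index-driven while loop with a nested inner skip-while by a single for-each fold over the lines carrying a boolean 'skipping' flag; each line is examined exactly once and there is no index arithmetic.
import Mathlib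
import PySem

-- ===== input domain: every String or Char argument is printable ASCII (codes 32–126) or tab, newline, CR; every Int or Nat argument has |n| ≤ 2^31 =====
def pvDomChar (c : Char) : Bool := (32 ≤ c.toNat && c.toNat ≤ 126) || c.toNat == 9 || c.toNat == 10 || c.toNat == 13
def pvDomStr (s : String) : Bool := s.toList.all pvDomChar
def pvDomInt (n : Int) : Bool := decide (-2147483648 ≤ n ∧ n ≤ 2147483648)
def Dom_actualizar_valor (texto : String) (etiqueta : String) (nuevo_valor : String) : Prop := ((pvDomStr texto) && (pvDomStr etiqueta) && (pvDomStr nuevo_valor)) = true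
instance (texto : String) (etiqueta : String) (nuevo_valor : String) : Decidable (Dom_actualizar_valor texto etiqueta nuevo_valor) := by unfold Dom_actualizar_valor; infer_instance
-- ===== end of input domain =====

-- B simplifies A's index-jumping while loop (with a nested skip-while) into one
-- for-each pass with a boolean 'skipping' flag; same exceptionless behaviour, same cost.

-- ===== PORT A =====
-- A's inner while: advance i until a line starting with "_" (or the end).
def pvSkipA (lineas : List String) (i : Nat) : Nat :=
  if h : i < lineas.length then
    if PySem.Str.startswith lineas[i] "_" then i
    else pvSkipA lineas (i + 1)
  else i
termination_by lineas.length - i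

-- needed by pvLoopA's termination argument
theorem pvSkipA_ge (lineas : List String) (i : Nat) : i ≤ pvSkipA lineas i := by
  unfold pvSkipA
  split
  · split
    · exact Nat.le_refl i
    · exact Nat.le_trans (Nat.le_succ i) (pvSkipA_ge lineas (i + 1))
  · exact Nat.le_refl i
termination_by lineas.length - i

def pvLoopA (lineas : List String) (etiqueta : String) (nv : List String) (i : Nat) (res : List String) : List String :=
  if h : i < lineas.length then
    let linea := lineas[i]
    let res2 := res ++ [linea]
    if PySem.Str.strip linea == etiqueta then
      pvLoopA lineas etiqueta nv (pvSkipA lineas (i + 1)) (res2 ++ nv)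
    else
      pvLoopA lineas etiqueta nv (i + 1) res2
  else res
termination_by lineas.length - i
decreasing_by
  · have := pvSkipA_ge lineas (i + 1); omega
  · omega

def actualizar_valor (texto : String) (etiqueta : String) (nuevo_valor : String) : String :=
  PySem.Str.join "\n" (pvLoopA (PySem.Str.splitlines texto) etiqueta (PySem.Str.splitlines nuevo_valor) 0 [])

-- ===== PORT B =====
-- state: (resultado, skipping)
def pvStepB (etiqueta : String) (nv : List String) (st : List String × Bool) (linea : String) : List String × Bool :=
  let skipping := if PySem.Str.startswith linea "_" then false else st.2
  if skipping then (st.1, skipping)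
  else
    let res := st.1 ++ [linea]
    if PySem.Str.strip linea == etiqueta then (res ++ nv, true) else (res, false)

def actualizar_valor_alt (texto : String) (etiqueta : String) (nuevo_valor : String) : String :=
  let nv := PySem.Str.splitlines nuevo_valor
  PySem.Str.join "\n" (((PySem.Str.splitlines texto).foldl (pvStepB etiqueta nv) ([], false)).1)

-- ===== PRECONDITION & SPEC =====
def Spec_actualizar_valor (texto : String) (etiqueta : String) (nuevo_valor : String) (out : String) : Prop := out = actualizar_valor_alt texto etiqueta nuevo_valor
instance (texto : String) (etiqueta : String) (nuevo_valor : String) (out : String) : Decidable (Spec_actualizar_valor texto etiqueta nuevo_valor out) := by unfold Spec_actualizar_valor; infer_instance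

-- ===== CLAIM (what is proved, stated in full; the proofs are below) =====
def Claim_equal_actualizar_valor : Prop := ∀ (texto : String) (etiqueta : String) (nuevo_valor : String), Dom_actualizar_valor texto etiqueta nuevo_valor → Spec_actualizar_valor texto etiqueta nuevo_valor (actualizar_valor texto etiqueta nuevo_valor)

-- ===== LEMMAS AND PROOFS =====

theorem pvSkipA_of_ge (lineas : List String) (i : Nat) (h : ¬ i < lineas.length) :
    pvSkipA lineas i = i := by
  unfold pvSkipA; simp [h]

-- joint invariant: folding B's step from state (res, false) over the suffix from i computes
-- A's loop from i; folding from (res, true) equals folding from (res, false) at pvSkipA i.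
theorem pvMain (lineas : List String) (etiqueta : String) (nv : List String) :
    ∀ k i, lineas.length - i ≤ k →
      (∀ res, ((lineas.drop i).foldl (pvStepB etiqueta nv) (res, false)).1
                = pvLoopA lineas etiqueta nv i res) ∧
      (∀ res, ((lineas.drop i).foldl (pvStepB etiqueta nv) (res, true)).1
                = ((lineas.drop (pvSkipA lineas i)).foldl (pvStepB etiqueta nv) (res, false)).1) := by
  intro k
  induction k with
  | zero =>
    intro i hi
    have hge : ¬ i < lineas.length := by omega
    have hd : lineas.drop i = [] := List.drop_eq_nil_of_le (by omega)
    constructor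
    · intro res
      rw [hd]
      rw [pvLoopA]; simp [hge]
    · intro res
      rw [pvSkipA_of_ge lineas i hge, hd]
      simp
  | succ k ih =>
    intro i hi
    by_cases h : i < lineas.length
    · have hd : lineas.drop i = lineas[i] :: lineas.drop (i + 1) :=
        List.drop_eq_getElem_cons h
      constructor
      · intro res
        rw [hd]
        simp only [List.foldl_cons]
        rw [pvLoopA]; simp only [h, dif_pos]
        by_cases hm : (PySem.Str.strip lineas[i] == etiqueta) = true
        · simp only [pvStepB, hm, if_true, ite_self, if_false, Bool.false_eq_true]
          have h2 := (ih (i + 1) (by omega)).2 (res ++ [lineas[i]] ++ nv)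
          rw [h2]
          have hsk := pvSkipA_ge lineas (i + 1)
          exact (ih (pvSkipA lineas (i + 1)) (by omega)).1 (res ++ [lineas[i]] ++ nv)
        · simp only [pvStepB, hm, if_false, ite_self, Bool.false_eq_true]
          exact (ih (i + 1) (by omega)).1 (res ++ [lineas[i]])
      · intro res
        by_cases hs : PySem.Chars.startswith lineas[i].toList ['_'] = true
        · have hsk : pvSkipA lineas i = i := by
            unfold pvSkipA; simp [h, hs]
          rw [hsk]
          rw [hd]
          simp only [List.foldl_cons]
          have : pvStepB etiqueta nv (res, true) lineas[i]
               = pvStepB etiqueta nv (res, false) lineas[i] := by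
            simp [pvStepB, hs]
          rw [this]
        · have hsk : pvSkipA lineas i = pvSkipA lineas (i + 1) := by
            conv_lhs => rw [pvSkipA]
            simp [h, hs]
          rw [hsk, hd]
          simp only [List.foldl_cons]
          have : pvStepB etiqueta nv (res, true) lineas[i] = (res, true) := by
            simp [pvStepB, hs]
          rw [this]
          exact (ih (i + 1) (by omega)).2 res
    · have hd : lineas.drop i = [] := List.drop_eq_nil_of_le (by omega)
      constructor
      · intro res
        rw [hd]; rw [pvLoopA]; simp [h]
      · intro res
        rw [pvSkipA_of_ge lineas i h, hd]
        simp

-- ===== VERDICT (by name: the statement is the Claim_ definition above) =====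
theorem actualizar_valor_spec : Claim_equal_actualizar_valor := by
  intro texto etiqueta nuevo_valor _
  show actualizar_valor texto etiqueta nuevo_valor = actualizar_valor_alt texto etiqueta nuevo_valor
  unfold actualizar_valor actualizar_valor_alt
  congr 1
  have h := (pvMain (PySem.Str.splitlines texto) etiqueta (PySem.Str.splitlines nuevo_valor)
      (PySem.Str.splitlines texto).length 0 (by omega)).1 []
  simpa using h.symm
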